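-- pv_equiv track=rewrite | github.com/ireka6114/kaldi | egs/t04_en_constrained/s5/scripts/t04_phone_level_scoring.py | _best_contiguous_span
-- ===== SOURCE A (Python) =====
-- def _best_contiguous_span(phone_seq: list[str], phone: str) -> tuple[int | None, int | None, int]:
--     best_s = None
--     best_e = None
--     best_len = 0
--     i = 0
--     while i < len(phone_seq):
--         if phone_seq[i] != phone:
--             i += 1
--             continue
--         j = i
--         while j + 1 < len(phone_seq) and phone_seq[j + 1] == phone:
--             j += 1
--         span_len = j - i + 1
--         if span_len > best_len:
--             best_s, best_e, best_len = i, j, span_len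
--         i = j + 1
--     return best_s, best_e, best_len
-- ===== SOURCE B (Python) =====
-- def _best_contiguous_span(phone_seq: list[str], phone: str) -> tuple[int | None, int | None, int]:
--     best_s = None
--     best_e = None
--     best_len = 0
--     cur = 0
--     for i, p in enumerate(phone_seq):
--         if p == phone:
--             cur += 1
--             if cur > best_len:
--                 best_s, best_e, best_len = i - cur + 1, i, cur
--         else:
--             cur = 0
--     return best_s, best_e, best_len
-- ===== Notes on version B (the rewrite author's own statement) =====
-- stated objective: simpler
-- what changed: Replaces A's nested while loops (outer index scan plus inner run-extension loop with an index jump) by a single flat for-loop threading a current-run-length accumulator that updates the best span on strictly greater length.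
import Mathlib
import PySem

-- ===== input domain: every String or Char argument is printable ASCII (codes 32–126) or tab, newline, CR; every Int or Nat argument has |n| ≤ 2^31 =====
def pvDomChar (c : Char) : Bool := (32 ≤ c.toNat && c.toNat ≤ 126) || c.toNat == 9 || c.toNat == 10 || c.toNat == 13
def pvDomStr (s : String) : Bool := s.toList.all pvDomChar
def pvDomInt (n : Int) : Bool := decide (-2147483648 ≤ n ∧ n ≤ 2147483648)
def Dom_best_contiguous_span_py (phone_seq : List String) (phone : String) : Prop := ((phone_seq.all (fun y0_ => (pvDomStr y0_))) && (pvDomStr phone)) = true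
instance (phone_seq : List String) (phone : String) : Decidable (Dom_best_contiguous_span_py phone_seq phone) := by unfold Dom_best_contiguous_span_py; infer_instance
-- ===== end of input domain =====

-- B replaces A's nested while loops (inner run-extension scan plus index jump) by one flat pass
-- threading a current-run-length accumulator; objective: simpler. Same return value on all inputs.

-- ===== PORT A =====
-- inner while loop of A: 'while j + 1 < len(phone_seq) and phone_seq[j+1] == phone: j += 1'
def pvExtend (seq : List String) (phone : String) (j : Nat) : Nat :=
  if h : j + 1 < seq.length then
    if seq[j+1] = phone then pvExtend seq phone (j+1) else j
  else j
termination_by seq.length - j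
decreasing_by omega

-- cited by pvLoopA's decreasing_by
theorem pvExtend_ge (seq : List String) (phone : String) (j : Nat) : j ≤ pvExtend seq phone j := by
  fun_induction pvExtend seq phone j with
  | case1 j h hp ih => omega
  | case2 j h hp => omega
  | case3 j h => omega

-- outer while loop of A
def pvLoopA (seq : List String) (phone : String) (i : Nat) (bs be : Option Int) (bl : Int) :
    Option Int × Option Int × Int :=
  if h : i < seq.length then
    if seq[i] ≠ phone then pvLoopA seq phone (i+1) bs be bl
    else
      let j := pvExtend seq phone i
      let span : Int := (j : Int) - (i : Int) + 1
      if span > bl then pvLoopA seq phone (j+1) (some (i : Int)) (some (j : Int)) span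
      else pvLoopA seq phone (j+1) bs be bl
  else (bs, be, bl)
termination_by seq.length - i
decreasing_by
  · omega
  · have := pvExtend_ge seq phone i; omega
  · have := pvExtend_ge seq phone i; omega

def best_contiguous_span_py (phone_seq : List String) (phone : String) : Option Int × Option Int × Int :=
  pvLoopA phone_seq phone 0 none none 0

-- ===== PORT B =====
-- loop body of B's single for-loop
def pvStepB (phone : String) (i : Nat) (p : String) (st : Option Int × Option Int × Int × Int) :
    Option Int × Option Int × Int × Int :=
  let (bs, be, bl, cur) := st
  if p = phone then
    let cur' := cur + 1
    if cur' > bl then (some ((i : Int) - cur' + 1), some (i : Int), cur', cur')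
    else (bs, be, bl, cur')
  else (bs, be, bl, 0)

-- B's 'for i, p in enumerate(phone_seq)' threading the state
def pvFoldB (phone : String) : List String → Nat → (Option Int × Option Int × Int × Int) →
    Option Int × Option Int × Int × Int
  | [], _, st => st
  | p :: rest, i, st => pvFoldB phone rest (i+1) (pvStepB phone i p st)

def best_contiguous_span_py_alt (phone_seq : List String) (phone : String) : Option Int × Option Int × Int :=
  let st := pvFoldB phone phone_seq 0 (none, none, 0, 0)
  (st.1, st.2.1, st.2.2.1)

-- ===== PRECONDITION & SPEC =====
def Spec_best_contiguous_span_py (phone_seq : List String) (phone : String) (out : Option Int × Option Int × Int) : Prop := out = best_contiguous_span_py_alt phone_seq phone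
instance (phone_seq : List String) (phone : String) (out : Option Int × Option Int × Int) : Decidable (Spec_best_contiguous_span_py phone_seq phone out) := by unfold Spec_best_contiguous_span_py; infer_instance

-- ===== CLAIM (what is proved, stated in full; the proofs are below) =====
def Claim_equal_best_contiguous_span_py : Prop := ∀ (phone_seq : List String) (phone : String), Dom_best_contiguous_span_py phone_seq phone → Spec_best_contiguous_span_py phone_seq phone (best_contiguous_span_py phone_seq phone)

-- ===== LEMMAS AND PROOFS =====

-- drop the current-run-length component of B's loop state
def pvFin (st : Option Int × Option Int × Int × Int) : Option Int × Option Int × Int :=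
  (st.1, st.2.1, st.2.2.1)

theorem pvRun_fold (phone : String) :
    ∀ (run rest : List String) (i : Nat) (bs be : Option Int) (bl cur : Int),
    run ≠ [] → (∀ x ∈ run, x = phone) →
    pvFoldB phone (run ++ rest) i (bs, be, bl, cur) =
    pvFoldB phone rest (i + run.length)
      (if cur + run.length > bl
       then (some ((i : Int) - cur), some ((i : Int) + run.length - 1), cur + run.length, cur + run.length)
       else (bs, be, bl, cur + run.length)) := by
  intro run
  induction run with
  | nil => intro rest i bs be bl cur hne; exact absurd rfl hne
  | cons x t ih =>
    intro rest i bs be bl cur _ hall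
    have hx : x = phone := hall x (List.mem_cons_self ..)
    have hcons : ∀ (p : String) (l : List String) (k : Nat) st,
        pvFoldB phone (p :: l) k st = pvFoldB phone l (k+1) (pvStepB phone k p st) :=
      fun _ _ _ _ => rfl
    have hstepv : pvStepB phone i x (bs, be, bl, cur) =
        if cur + 1 > bl then (some ((i : Int) - (cur + 1) + 1), some (i : Int), cur + 1, cur + 1)
        else (bs, be, bl, cur + 1) := by
      simp only [pvStepB]; rw [if_pos hx]
    rw [List.cons_append, hcons, hstepv]
    cases t with
    | nil =>
      have h1 : ((x :: ([] : List String)).length : Int) = 1 := by simp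
      have h2 : (x :: ([] : List String)).length = 1 := by simp
      rw [List.nil_append, h2]
      push_cast
      congr 1
      split_ifs with hb
      · simp only [Prod.mk.injEq, Option.some.injEq]
        and_intros <;> first | trivial | ring
      · rfl
    | cons y s =>
      have hLn : 1 ≤ (y :: s).length := by simp
      have hLi : (1 : Int) ≤ ((y :: s).length : Int) := by exact_mod_cast hLn
      by_cases hb : cur + 1 > bl
      · rw [if_pos hb,
          ih rest (i+1) _ _ _ _ (by simp) (fun z hz => hall z (List.mem_cons_of_mem _ hz)),
          if_pos (by omega)]
        have hc2 : cur + ((x :: y :: s).length : Int) > bl := by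
          simp only [List.length_cons] at *; push_cast at *; omega
        rw [if_pos hc2]
        congr 1
        · simp [List.length_cons]; omega
        · simp only [List.length_cons, Prod.mk.injEq, Option.some.injEq]
          push_cast
          and_intros <;> first | trivial | ring
      · rw [if_neg hb,
          ih rest (i+1) _ _ _ _ (by simp) (fun z hz => hall z (List.mem_cons_of_mem _ hz))]
        have hceq : ((cur + 1) + ((y :: s).length : Int) > bl) ↔
            (cur + ((x :: y :: s).length : Int) > bl) := by
          simp only [List.length_cons]; omega
        by_cases hc : cur + ((x :: y :: s).length : Int) > bl
        · rw [if_pos (hceq.mpr hc), if_pos hc]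
          congr 1
          · simp [List.length_cons]; omega
          · simp only [List.length_cons, Prod.mk.injEq, Option.some.injEq]
            push_cast
            and_intros <;> first | trivial | ring
        · rw [if_neg (fun hh => hc (hceq.mp hh)), if_neg hc]
          congr 1
          · simp [List.length_cons]; omega
          · simp only [List.length_cons, Prod.mk.injEq]
            push_cast
            and_intros <;> first | trivial | ring

theorem pvExtend_lt (seq : List String) (phone : String) (j : Nat) (h : j < seq.length) :
    pvExtend seq phone j < seq.length := by
  fun_induction pvExtend seq phone j with
  | case1 j h1 hp ih => exact ih (by omega)
  | case2 j h1 hp => exact h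
  | case3 j h1 => exact h

theorem pvExtend_mem (seq : List String) (phone : String) (i : Nat) :
    ∀ k (hk : k < seq.length), i < k → k ≤ pvExtend seq phone i → seq[k] = phone := by
  fun_induction pvExtend seq phone i with
  | case1 j h1 hp ih =>
    intro k hk hk1 hk2
    rcases Nat.eq_or_lt_of_le (Nat.succ_le_of_lt hk1) with he | hl
    · subst he; exact hp
    · exact ih k hk hl hk2
  | case2 j h1 hp => intro k hk hk1 hk2; omega
  | case3 j h1 => intro k hk hk1 hk2; omega

theorem pvExtend_stop (seq : List String) (phone : String) (i : Nat)
    (h : pvExtend seq phone i + 1 < seq.length) : seq[pvExtend seq phone i + 1] ≠ phone := by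
  fun_induction pvExtend seq phone i with
  | case1 j h1 hp ih => exact ih h
  | case2 j h1 hp => exact hp
  | case3 j h1 => omega

theorem pvCur_irrel (phone : String) (rest : List String) (i : Nat) (bs be : Option Int)
    (bl c1 c2 : Int)
    (h : rest = [] ∨ ∃ x t, rest = x :: t ∧ x ≠ phone) :
    pvFin (pvFoldB phone rest i (bs, be, bl, c1)) = pvFin (pvFoldB phone rest i (bs, be, bl, c2)) := by
  rcases h with h | ⟨x, t, h, hx⟩
  · subst h; rfl
  · subst h
    have hc : ∀ c : Int, pvStepB phone i x (bs, be, bl, c) = (bs, be, bl, 0) := by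
      intro c; simp only [pvStepB]; rw [if_neg hx]
    rw [show pvFoldB phone (x :: t) i (bs, be, bl, c1)
          = pvFoldB phone t (i+1) (pvStepB phone i x (bs, be, bl, c1)) from rfl,
        show pvFoldB phone (x :: t) i (bs, be, bl, c2)
          = pvFoldB phone t (i+1) (pvStepB phone i x (bs, be, bl, c2)) from rfl,
        hc, hc]

theorem pvMain (seq : List String) (phone : String) :
    ∀ (i : Nat) (bs be : Option Int) (bl : Int),
    pvLoopA seq phone i bs be bl = pvFin (pvFoldB phone (seq.drop i) i (bs, be, bl, 0)) := by
  intro i bs be bl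
  fun_induction pvLoopA seq phone i bs be bl with
  | case1 i bs be bl h hne ih =>
    rw [List.drop_eq_getElem_cons h]
    have hcons : ∀ (p : String) (l : List String) (k : Nat) st,
        pvFoldB phone (p :: l) k st = pvFoldB phone l (k+1) (pvStepB phone k p st) :=
      fun _ _ _ _ => rfl
    rw [hcons]
    have : pvStepB phone i (seq[i]) (bs, be, bl, 0) = (bs, be, bl, 0) := by
      simp only [pvStepB]; rw [if_neg hne]
    rw [this]
    exact ih
  | case2 i bs be bl h hph j span hspan ih =>
    have hphone : seq[i] = phone := not_not.mp hph
    have hjv : j = pvExtend seq phone i := rfl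
    have hspanv : span = (j : Int) - (i : Int) + 1 := rfl
    clear_value span j
    have hij : i ≤ j := by rw [hjv]; exact pvExtend_ge seq phone i
    have hjl : j < seq.length := by rw [hjv]; exact pvExtend_lt seq phone i h
    have hlen : ((seq.drop i).take (j + 1 - i)).length = j + 1 - i := by
      simp [List.length_take, List.length_drop]; omega
    have hsplit : seq.drop i = (seq.drop i).take (j + 1 - i) ++ seq.drop (j + 1) := by
      conv_lhs => rw [← List.take_append_drop (j + 1 - i) (seq.drop i)]
      rw [List.drop_drop, show i + (j + 1 - i) = j + 1 by omega]
    have hall : ∀ x ∈ (seq.drop i).take (j + 1 - i), x = phone := by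
      intro x hx
      obtain ⟨m, hm, hgx⟩ := List.getElem_of_mem hx
      rw [hlen] at hm
      have him : i + m < seq.length := by omega
      have hget : ((seq.drop i).take (j + 1 - i))[m]'(by rw [hlen]; exact hm) = seq[i + m]'him := by
        simp [List.getElem_take, List.getElem_drop]
      rw [hget] at hgx
      rcases Nat.eq_zero_or_pos m with h0 | hpos
      · subst h0; rw [← hgx]; simpa using hphone
      · rw [← hgx]
        exact pvExtend_mem seq phone i (i + m) him (by omega) (by rw [← hjv]; omega)
    have hne : (seq.drop i).take (j + 1 - i) ≠ [] := by
      intro hc; rw [hc] at hlen; simp at hlen; omega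
    rw [hsplit, pvRun_fold phone _ _ i bs be bl 0 hne hall, hlen]
    have hiL : i + (j + 1 - i) = j + 1 := by omega
    have hLint : (((j + 1 - i : Nat)) : Int) = (j : Int) - (i : Int) + 1 := by omega
    rw [hiL, hLint]
    have hrest : seq.drop (j + 1) = [] ∨
        ∃ x t, seq.drop (j + 1) = x :: t ∧ x ≠ phone := by
      by_cases hjj : j + 1 < seq.length
      · refine Or.inr ⟨seq[j+1], seq.drop (j + 2), List.drop_eq_getElem_cons hjj, ?_⟩
        have := pvExtend_stop seq phone i (by rw [← hjv]; exact hjj)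
        simpa [← hjv] using this
      · exact Or.inl (List.drop_of_length_le (by omega))
    rw [if_pos (show 0 + ((j : Int) - (i : Int) + 1) > bl by omega)]
    rw [ih]
    have h1 : (i : Int) - 0 = (i : Int) := by ring
    have h2 : (i : Int) + ((j : Int) - (i : Int) + 1) - 1 = (j : Int) := by ring
    have h3 : (0 : Int) + ((j : Int) - (i : Int) + 1) = (j : Int) - (i : Int) + 1 := by ring
    rw [h1, h2, h3, hspanv]
    exact (pvCur_irrel phone _ (j+1) _ _ _ _ 0 hrest).symm
  | case3 i bs be bl h hph j span hspan ih =>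
    have hphone : seq[i] = phone := not_not.mp hph
    have hjv : j = pvExtend seq phone i := rfl
    have hspanv : span = (j : Int) - (i : Int) + 1 := rfl
    clear_value span j
    have hij : i ≤ j := by rw [hjv]; exact pvExtend_ge seq phone i
    have hjl : j < seq.length := by rw [hjv]; exact pvExtend_lt seq phone i h
    have hlen : ((seq.drop i).take (j + 1 - i)).length = j + 1 - i := by
      simp [List.length_take, List.length_drop]; omega
    have hsplit : seq.drop i = (seq.drop i).take (j + 1 - i) ++ seq.drop (j + 1) := by
      conv_lhs => rw [← List.take_append_drop (j + 1 - i) (seq.drop i)]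
      rw [List.drop_drop, show i + (j + 1 - i) = j + 1 by omega]
    have hall : ∀ x ∈ (seq.drop i).take (j + 1 - i), x = phone := by
      intro x hx
      obtain ⟨m, hm, hgx⟩ := List.getElem_of_mem hx
      rw [hlen] at hm
      have him : i + m < seq.length := by omega
      have hget : ((seq.drop i).take (j + 1 - i))[m]'(by rw [hlen]; exact hm) = seq[i + m]'him := by
        simp [List.getElem_take, List.getElem_drop]
      rw [hget] at hgx
      rcases Nat.eq_zero_or_pos m with h0 | hpos
      · subst h0; rw [← hgx]; simpa using hphone
      · rw [← hgx]
        exact pvExtend_mem seq phone i (i + m) him (by omega) (by rw [← hjv]; omega)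
    have hne : (seq.drop i).take (j + 1 - i) ≠ [] := by
      intro hc; rw [hc] at hlen; simp at hlen; omega
    rw [hsplit, pvRun_fold phone _ _ i bs be bl 0 hne hall, hlen]
    have hiL : i + (j + 1 - i) = j + 1 := by omega
    have hLint : (((j + 1 - i : Nat)) : Int) = (j : Int) - (i : Int) + 1 := by omega
    rw [hiL, hLint]
    have hrest : seq.drop (j + 1) = [] ∨
        ∃ x t, seq.drop (j + 1) = x :: t ∧ x ≠ phone := by
      by_cases hjj : j + 1 < seq.length
      · refine Or.inr ⟨seq[j+1], seq.drop (j + 2), List.drop_eq_getElem_cons hjj, ?_⟩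
        have := pvExtend_stop seq phone i (by rw [← hjv]; exact hjj)
        simpa [← hjv] using this
      · exact Or.inl (List.drop_of_length_le (by omega))
    rw [if_neg (show ¬ (0 + ((j : Int) - (i : Int) + 1) > bl) by omega)]
    rw [ih]
    exact (pvCur_irrel phone _ (j+1) _ _ _ _ 0 hrest).symm
  | case4 i bs be bl h =>
    rw [List.drop_of_length_le (by omega)]
    rfl

-- ===== VERDICT (by name: the statement is the Claim_ definition above) =====
theorem best_contiguous_span_py_spec : Claim_equal_best_contiguous_span_py := by
  intro seq phone _
  unfold Spec_best_contiguous_span_py best_contiguous_span_py best_contiguous_span_py_alt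
  rw [pvMain seq phone 0 none none 0]
  rfl
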